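-- pv_equiv track=rewrite | github.com/SajinKowserSK/algorithms-practice | Grokking Coding Interview/P11 - Modified Binary Search/Min Diff Element.py | leftLargest
-- ===== SOURCE A (Python) =====
-- def leftLargest(arr, key):
--     start, end = 0, len(arr) - 1
--
--     while start <= end:
--         mid = start + (end - start) / 2
--         mid = int(mid)
--
--         if arr[mid] == key:
--             return mid
--
--         elif arr[mid] < key:
--             start = mid + 1
--
--         else:
--             end = mid - 1
--
--     return min(len(arr) - 1, max(0, end))
-- ===== SOURCE B (Python) =====
-- def leftLargest(arr, key):
--     def go(seg, off):
--         if not seg: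
--             return off - 1
--         m = (len(seg) - 1) // 2
--         if seg[m] == key:
--             return off + m
--         if seg[m] < key:
--             return go(seg[m+1:], off + m + 1)
--         return go(seg[:m], off)
--
--     n = len(arr)
--     return min(n - 1, max(0, go(arr, 0)))
-- ===== Notes on version B (the rewrite author's own statement) =====
-- stated objective: alternative
-- what changed: A's iterative index-bound loop (float midpoint, separate unclamped found-return and clamped miss-return) is replaced by structural recursion on list slices: a helper go(seg, off) recurses on seg[m+1:] or seg[:m] carrying an offset, the base case returns off-1, and one uniform min/max clamp at the end handles both outcomes.
import Mathlib
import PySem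

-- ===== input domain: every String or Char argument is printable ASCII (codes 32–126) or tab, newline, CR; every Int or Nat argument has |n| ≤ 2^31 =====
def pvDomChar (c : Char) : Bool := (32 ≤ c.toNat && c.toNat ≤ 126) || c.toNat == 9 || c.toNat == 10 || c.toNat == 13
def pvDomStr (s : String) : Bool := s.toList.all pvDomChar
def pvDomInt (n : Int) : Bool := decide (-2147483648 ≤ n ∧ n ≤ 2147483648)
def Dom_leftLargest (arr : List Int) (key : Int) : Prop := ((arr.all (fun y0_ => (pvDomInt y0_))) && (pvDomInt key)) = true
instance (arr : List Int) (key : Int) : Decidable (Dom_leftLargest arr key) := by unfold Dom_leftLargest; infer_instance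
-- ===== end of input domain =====

-- B replaces A's iterative index-bound loop with structural recursion on list slices
-- (go seg off, recursing on seg[m+1:] / seg[:m]) and one uniform final clamp;
-- objective: alternative decomposition, same logarithmic step count.


-- ===== PORT A =====
-- the while loop, state (start, end_); mid = int(start + (end-start)/2): since end-start ≥ 0 here and
-- |values| ≤ 2^31 (exact in float), int() of the nonneg float half is exactly floor division by 2
-- (mid and arr[mid] are written inline; Python itself reads arr[mid] twice).
-- arr[mid] is always in range on the states A reaches (0 ≤ start ≤ mid ≤ end ≤ len-1), so A never raises;
-- the .getD 0 default is unreachable from leftLargest.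
def leftLargestLoop (arr : List Int) (key start end_ : Int) : Int :=
  if _h : start ≤ end_ then
    if (PySem.List.pyGet? arr (start + PySem.Int.floordiv (end_ - start) 2)).getD 0 = key then
      start + PySem.Int.floordiv (end_ - start) 2
    else if (PySem.List.pyGet? arr (start + PySem.Int.floordiv (end_ - start) 2)).getD 0 < key then
      leftLargestLoop arr key (start + PySem.Int.floordiv (end_ - start) 2 + 1) end_
    else
      leftLargestLoop arr key start (start + PySem.Int.floordiv (end_ - start) 2 - 1)
  else min ((arr.length : Int) - 1) (max 0 end_)
termination_by (end_ - start + 1).toNat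
decreasing_by
  all_goals
    have hb := PySem.Int.floordiv_two_mid_bounds (lo := 0) (hi := end_ - start) (by omega)
    rw [zero_add] at hb
    omega

def leftLargest (arr : List Int) (key : Int) : Int :=
  leftLargestLoop arr key 0 ((arr.length : Int) - 1)

-- ===== PORT B =====
-- go(seg, off) from Source B: structural recursion on the segment, m = (len(seg)-1)//2 and seg[m]
-- written inline; seg[m] is always in range on a nonempty segment, so the .getD 0 default is unreachable.
def leftLargestGo (key : Int) (seg : List Int) (off : Int) : Int :=
  if _h : seg = [] then off - 1
  else
    if (PySem.List.pyGet? seg (PySem.Int.floordiv ((seg.length : Int) - 1) 2)).getD 0 = key then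
      off + PySem.Int.floordiv ((seg.length : Int) - 1) 2
    else if (PySem.List.pyGet? seg (PySem.Int.floordiv ((seg.length : Int) - 1) 2)).getD 0 < key then
      leftLargestGo key
        (PySem.List.slice seg (some (PySem.Int.floordiv ((seg.length : Int) - 1) 2 + 1)) none)
        (off + PySem.Int.floordiv ((seg.length : Int) - 1) 2 + 1)
    else
      leftLargestGo key
        (PySem.List.slice seg none (some (PySem.Int.floordiv ((seg.length : Int) - 1) 2))) off
termination_by seg.length
decreasing_by
  all_goals
    have hlen : 0 < seg.length := List.length_pos_iff.mpr _h
    have hm : 0 ≤ PySem.Int.floordiv ((seg.length : Int) - 1) 2 ∧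
        PySem.Int.floordiv ((seg.length : Int) - 1) 2 ≤ (seg.length : Int) - 1 := by
      rw [PySem.Int.floordiv_eq_ediv_of_pos (by norm_num : (0:Int) < 2)]
      omega
  · rw [PySem.List.slice_from seg (a := PySem.Int.floordiv ((seg.length : Int) - 1) 2 + 1) (by omega)]
    simp only [List.length_drop]
    omega
  · rw [PySem.List.slice_to seg (b := PySem.Int.floordiv ((seg.length : Int) - 1) 2) hm.1]
    simp only [List.length_take]
    omega

def leftLargest_alt (arr : List Int) (key : Int) : Int :=
  min ((arr.length : Int) - 1) (max 0 (leftLargestGo key arr 0))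

-- ===== PRECONDITION & SPEC =====
def Spec_leftLargest (arr : List Int) (key : Int) (out : Int) : Prop := out = leftLargest_alt arr key
instance (arr : List Int) (key : Int) (out : Int) : Decidable (Spec_leftLargest arr key out) := by unfold Spec_leftLargest; infer_instance

-- ===== CLAIM (what is proved, stated in full; the proofs are below) =====
def Claim_equal_leftLargest : Prop := ∀ (arr : List Int) (key : Int), Dom_leftLargest arr key → Spec_leftLargest arr key (leftLargest arr key)

-- ===== LEMMAS AND PROOFS =====

-- A's loop on index bounds (lo, hi) coincides, after the final clamp, with B's recursion on the
-- segment arr[lo..hi] carried with offset lo: A's midpoint lo + (hi-lo)//2 is lo + m for B's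
-- relative midpoint m = (len(seg)-1)//2, and the two recursions shrink the same interval.
theorem loop_eq_go (arr : List Int) (key : Int) :
    ∀ (n : Nat) (lo hi : Int), (hi - lo + 1).toNat ≤ n → 0 ≤ lo → lo ≤ hi + 1 →
      hi ≤ (arr.length : Int) - 1 →
      leftLargestLoop arr key lo hi =
        min ((arr.length : Int) - 1)
          (max 0 (leftLargestGo key ((arr.drop lo.toNat).take (hi + 1 - lo).toNat) lo)) := by
  intro n
  induction n with
  | zero =>
    intro lo hi hn hlo hlohi hhi
    have h0 : (hi + 1 - lo).toNat = 0 := by omega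
    rw [leftLargestLoop, dif_neg (by omega : ¬ lo ≤ hi), h0, List.take_zero, leftLargestGo,
        dif_pos rfl]
    have : hi = lo - 1 := by omega
    rw [this]
  | succ n ih =>
    intro lo hi hn hlo hlohi hhi
    by_cases h : lo ≤ hi
    case neg =>
      have h0 : (hi + 1 - lo).toNat = 0 := by omega
      rw [leftLargestLoop, dif_neg h, h0, List.take_zero, leftLargestGo, dif_pos rfl]
      have : hi = lo - 1 := by omega
      rw [this]
    case pos =>
      set L : Nat := (hi + 1 - lo).toNat with hL
      set seg : List Int := (arr.drop lo.toNat).take L with hseg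
      have hLpos : 0 < L := by omega
      have hseglen : seg.length = L := by
        rw [hseg, List.length_take, List.length_drop]
        omega
      have hne : ¬ seg = [] := by
        intro habs; rw [habs] at hseglen; simp at hseglen; omega
      have hmid : PySem.Int.floordiv ((seg.length : Int) - 1) 2 = PySem.Int.floordiv (hi - lo) 2 := by
        rw [hseglen]
        congr 1
        omega
      have hb := PySem.Int.floordiv_two_mid_bounds (lo := 0) (hi := hi - lo) (by omega)
      rw [zero_add] at hb
      set m : Int := PySem.Int.floordiv (hi - lo) 2 with hmdef
      have hmn : m.toNat < L := by omega
      have hmnn : (lo + m).toNat = lo.toNat + m.toNat := by omega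
      -- the value both programs inspect is the same list element
      have hv : PySem.List.pyGet? seg m = PySem.List.pyGet? arr (lo + m) := by
        rw [PySem.List.pyGet?_of_nonneg seg (by omega), PySem.List.pyGet?_of_nonneg arr (by omega),
            hseg, hmnn, List.getElem?_take_of_lt hmn, List.getElem?_drop]
      rw [leftLargestLoop, dif_pos h, leftLargestGo, dif_neg hne, hmid, hv]
      by_cases h1 : (PySem.List.pyGet? arr (lo + m)).getD 0 = key
      · rw [if_pos h1, if_pos h1]
        omega
      · by_cases h2 : (PySem.List.pyGet? arr (lo + m)).getD 0 < key
        · rw [if_neg h1, if_neg h1, if_pos h2, if_pos h2]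
          have hslice : PySem.List.slice seg (some (m + 1)) none =
              (arr.drop (lo + m + 1).toNat).take (hi + 1 - (lo + m + 1)).toNat := by
            rw [PySem.List.slice_from seg (by omega : (0:Int) ≤ m + 1), hseg,
                List.drop_take, List.drop_drop]
            congr 1
            · omega
            · congr 1; omega
          rw [hslice]
          exact ih (lo + m + 1) hi (by omega) (by omega) (by omega) hhi
        · rw [if_neg h1, if_neg h1, if_neg h2, if_neg h2]
          have hslice : PySem.List.slice seg none (some m) =
              (arr.drop lo.toNat).take ((lo + m - 1) + 1 - lo).toNat := by
            rw [PySem.List.slice_to seg (by omega : (0:Int) ≤ m), hseg, List.take_take]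
            congr 1
            omega
          rw [hslice]
          have hrec := ih lo (lo + m - 1) (by omega) hlo (by omega) (by omega)
          rw [hrec]

-- ===== VERDICT (by name: the statement is the Claim_ definition above) =====
theorem leftLargest_spec : Claim_equal_leftLargest := by
  intro arr key _
  unfold Spec_leftLargest leftLargest leftLargest_alt
  have h := loop_eq_go arr key (arr.length + 1) 0 ((arr.length : Int) - 1)
    (by omega) (by omega) (by omega) (by omega)
  have hseg : ((arr.drop (0:Int).toNat).take (((arr.length : Int) - 1) + 1 - 0).toNat) = arr := by
    simp
  rw [h, hseg]
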